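-- pv_equiv track=rewrite | github.com/wilmurillo-ai/Design-Assistant | .skills/openclaw-skills/skills/asaotomo/fofamap/scripts/fofa_recon.py | allowed_search_fields_for_vip_level
-- ===== SOURCE A (Python) =====
-- from typing import Any, Dict, Iterable, List, Sequence
--
-- LEVEL0_SEARCH_FIELDS = [
--     "ip",
--     "port",
--     "protocol",
--     "base_protocol",
--     "host",
--     "domain",
--     "link",
--     "title",
--     "server",
--     "os",
--     "header",
--     "banner",
--     "icp",
--     "jarm",
--     "country",
--     "country_name",
--     "region",
--     "city",
--     "longitude",
--     "latitude",
--     "asn",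
--     "org",
--     "cert",
--     "cert.domain",
--     "cert.sn",
--     "cert.issuer.org",
--     "cert.issuer.cn",
--     "cert.subject.org",
--     "cert.subject.cn",
--     "tls.ja3s",
--     "tls.version",
--     "cert.not_before",
--     "cert.not_after",
--     "status_code",
-- ]
--
-- LEVEL11_SEARCH_FIELDS = [
--     "header_hash",
--     "banner_hash",
--     "banner_fid",
-- ]
--
-- LEVEL12_SEARCH_FIELDS = [
--     "product",
--     "product_category",
--     "cname",
--     "lastupdatetime",
-- ]
--
-- LEVEL13_SEARCH_FIELDS = [
--     "body",
--     "icon_hash",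
--     "product.version",
--     "cert.is_valid",
--     "cname_domain",
--     "cert.is_match",
--     "cert.is_equal",
-- ]
--
-- LEVEL5_SEARCH_FIELDS = [
--     "icon",
--     "fid",
--     "structinfo",
-- ]
--
-- def ordered_unique(values: Iterable[str]) -> List[str]:
--     seen: set[str] = set()
--     ordered: List[str] = []
--     for value in values:
--         if value not in seen:
--             seen.add(value)
--             ordered.append(value)
--     return ordered
--
-- def allowed_search_fields_for_vip_level(vip_level: int) -> List[str]:
--     groups: List[List[str]] = [LEVEL0_SEARCH_FIELDS]
--
--     if vip_level in {1, 11}: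
--         groups.append(LEVEL11_SEARCH_FIELDS)
--     elif vip_level in {2, 12}:
--         groups.extend([LEVEL11_SEARCH_FIELDS, LEVEL12_SEARCH_FIELDS])
--     elif vip_level == 13:
--         groups.extend([LEVEL11_SEARCH_FIELDS, LEVEL12_SEARCH_FIELDS, LEVEL13_SEARCH_FIELDS])
--     elif vip_level == 5:
--         groups.extend([LEVEL11_SEARCH_FIELDS, LEVEL12_SEARCH_FIELDS, LEVEL13_SEARCH_FIELDS, LEVEL5_SEARCH_FIELDS])
--     elif vip_level == 22:
--         groups.append([])
--     elif vip_level > 13: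
--         groups.extend([LEVEL11_SEARCH_FIELDS, LEVEL12_SEARCH_FIELDS, LEVEL13_SEARCH_FIELDS])
--
--     return ordered_unique(field for group in groups for field in group)
-- ===== SOURCE B (Python) =====
-- from typing import List
--
-- LEVEL0_SEARCH_FIELDS = [
--     "ip", "port", "protocol", "base_protocol", "host", "domain", "link",
--     "title", "server", "os", "header", "banner", "icp", "jarm", "country",
--     "country_name", "region", "city", "longitude", "latitude", "asn", "org",
--     "cert", "cert.domain", "cert.sn", "cert.issuer.org", "cert.issuer.cn",
--     "cert.subject.org", "cert.subject.cn", "tls.ja3s", "tls.version",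
--     "cert.not_before", "cert.not_after", "status_code",
-- ]
-- LEVEL11_SEARCH_FIELDS = ["header_hash", "banner_hash", "banner_fid"]
-- LEVEL12_SEARCH_FIELDS = ["product", "product_category", "cname", "lastupdatetime"]
-- LEVEL13_SEARCH_FIELDS = [
--     "body", "icon_hash", "product.version", "cert.is_valid", "cname_domain",
--     "cert.is_match", "cert.is_equal",
-- ]
-- LEVEL5_SEARCH_FIELDS = ["icon", "fid", "structinfo"]
--
-- _EXTRA_BY_LEVEL = {
--     1: LEVEL11_SEARCH_FIELDS,
--     11: LEVEL11_SEARCH_FIELDS,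
--     2: LEVEL11_SEARCH_FIELDS + LEVEL12_SEARCH_FIELDS,
--     12: LEVEL11_SEARCH_FIELDS + LEVEL12_SEARCH_FIELDS,
--     5: LEVEL11_SEARCH_FIELDS + LEVEL12_SEARCH_FIELDS + LEVEL13_SEARCH_FIELDS + LEVEL5_SEARCH_FIELDS,
--     22: [],
-- }
-- _EXTRA_HIGH = LEVEL11_SEARCH_FIELDS + LEVEL12_SEARCH_FIELDS + LEVEL13_SEARCH_FIELDS
--
-- def allowed_search_fields_for_vip_level(vip_level: int) -> List[str]:
--     # All field groups are mutually disjoint and duplicate-free, so the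
--     # deduplication pass of the original is a no-op: return the flat concatenation.
--     extra = _EXTRA_BY_LEVEL.get(vip_level)
--     if extra is None:
--         extra = _EXTRA_HIGH if vip_level >= 13 else []
--     return LEVEL0_SEARCH_FIELDS + extra
-- ===== Notes on version B (the rewrite author's own statement) =====
-- stated objective: simpler
-- what changed: Replaces the if/elif chain plus seen-set ordered_unique pass with a precomputed dispatch table of extra-field lists plus a >=13 fallback, returning a flat concatenation (dedup dropped since all groups are mutually disjoint).
import Mathlib
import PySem

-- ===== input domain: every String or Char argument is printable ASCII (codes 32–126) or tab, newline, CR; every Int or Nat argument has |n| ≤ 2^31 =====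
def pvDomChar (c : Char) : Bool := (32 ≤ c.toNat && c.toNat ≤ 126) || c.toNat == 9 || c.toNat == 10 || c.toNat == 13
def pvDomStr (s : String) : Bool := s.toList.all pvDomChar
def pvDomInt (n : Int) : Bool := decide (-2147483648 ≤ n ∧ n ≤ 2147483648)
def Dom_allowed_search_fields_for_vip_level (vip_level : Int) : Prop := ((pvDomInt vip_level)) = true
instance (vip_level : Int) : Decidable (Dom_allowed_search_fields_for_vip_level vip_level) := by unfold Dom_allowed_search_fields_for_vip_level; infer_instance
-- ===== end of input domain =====

set_option maxRecDepth 4000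


-- B replaces A's if/elif chain + seen-set dedup with a dispatch table and a flat
-- concatenation (the field groups are mutually disjoint, so the dedup is a no-op): simpler.

-- ===== PORT A =====
def LEVEL0_SEARCH_FIELDS : List String :=
  ["ip", "port", "protocol", "base_protocol", "host", "domain", "link",
   "title", "server", "os", "header", "banner", "icp", "jarm", "country",
   "country_name", "region", "city", "longitude", "latitude", "asn", "org",
   "cert", "cert.domain", "cert.sn", "cert.issuer.org", "cert.issuer.cn",
   "cert.subject.org", "cert.subject.cn", "tls.ja3s", "tls.version",
   "cert.not_before", "cert.not_after", "status_code"]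

def LEVEL11_SEARCH_FIELDS : List String := ["header_hash", "banner_hash", "banner_fid"]

def LEVEL12_SEARCH_FIELDS : List String := ["product", "product_category", "cname", "lastupdatetime"]

def LEVEL13_SEARCH_FIELDS : List String :=
  ["body", "icon_hash", "product.version", "cert.is_valid", "cname_domain",
   "cert.is_match", "cert.is_equal"]

def LEVEL5_SEARCH_FIELDS : List String := ["icon", "fid", "structinfo"]

-- ordered_unique: seen-set + ordered-list accumulator, exactly as in A
def ordered_unique (values : List String) : List String :=
  (values.foldl
    (fun (st : PySem.Set String × List String) v =>
      if PySem.Set.contains st.1 v then st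
      else (PySem.Set.add st.1 v, st.2 ++ [v]))
    (PySem.Set.empty, [])).2

def allowed_search_fields_for_vip_level (vip_level : Int) : List String :=
  let groups : List (List String) :=
    if vip_level = 1 ∨ vip_level = 11 then
      [LEVEL0_SEARCH_FIELDS] ++ [LEVEL11_SEARCH_FIELDS]
    else if vip_level = 2 ∨ vip_level = 12 then
      [LEVEL0_SEARCH_FIELDS] ++ [LEVEL11_SEARCH_FIELDS, LEVEL12_SEARCH_FIELDS]
    else if vip_level = 13 then
      [LEVEL0_SEARCH_FIELDS] ++ [LEVEL11_SEARCH_FIELDS, LEVEL12_SEARCH_FIELDS, LEVEL13_SEARCH_FIELDS]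
    else if vip_level = 5 then
      [LEVEL0_SEARCH_FIELDS] ++ [LEVEL11_SEARCH_FIELDS, LEVEL12_SEARCH_FIELDS, LEVEL13_SEARCH_FIELDS, LEVEL5_SEARCH_FIELDS]
    else if vip_level = 22 then
      [LEVEL0_SEARCH_FIELDS] ++ [[]]
    else if vip_level > 13 then
      [LEVEL0_SEARCH_FIELDS] ++ [LEVEL11_SEARCH_FIELDS, LEVEL12_SEARCH_FIELDS, LEVEL13_SEARCH_FIELDS]
    else
      [LEVEL0_SEARCH_FIELDS]
  ordered_unique (groups.flatMap id)

-- ===== PORT B =====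
def EXTRA_BY_LEVEL : PySem.Dict Int (List String) :=
  PySem.Dict.ofList
    [(1, LEVEL11_SEARCH_FIELDS),
     (11, LEVEL11_SEARCH_FIELDS),
     (2, LEVEL11_SEARCH_FIELDS ++ LEVEL12_SEARCH_FIELDS),
     (12, LEVEL11_SEARCH_FIELDS ++ LEVEL12_SEARCH_FIELDS),
     (5, LEVEL11_SEARCH_FIELDS ++ LEVEL12_SEARCH_FIELDS ++ LEVEL13_SEARCH_FIELDS ++ LEVEL5_SEARCH_FIELDS),
     (22, [])]

def EXTRA_HIGH : List String :=
  LEVEL11_SEARCH_FIELDS ++ LEVEL12_SEARCH_FIELDS ++ LEVEL13_SEARCH_FIELDS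

def allowed_search_fields_for_vip_level_alt (vip_level : Int) : List String :=
  let extra :=
    match EXTRA_BY_LEVEL.get? vip_level with
    | some e => e
    | none => if vip_level ≥ 13 then EXTRA_HIGH else []
  LEVEL0_SEARCH_FIELDS ++ extra

-- ===== PRECONDITION & SPEC =====
def Spec_allowed_search_fields_for_vip_level (vip_level : Int) (out : List String) : Prop := out = allowed_search_fields_for_vip_level_alt vip_level
instance (vip_level : Int) (out : List String) : Decidable (Spec_allowed_search_fields_for_vip_level vip_level out) := by unfold Spec_allowed_search_fields_for_vip_level; infer_instance

-- ===== CLAIM (what is proved, stated in full; the proofs are below) =====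
def Claim_equal_allowed_search_fields_for_vip_level : Prop := ∀ (vip_level : Int), Dom_allowed_search_fields_for_vip_level vip_level → Spec_allowed_search_fields_for_vip_level vip_level (allowed_search_fields_for_vip_level vip_level)

-- ===== LEMMAS AND PROOFS =====

-- ===== VERDICT (by name: the statement is the Claim_ definition above) =====
theorem allowed_search_fields_for_vip_level_spec : Claim_equal_allowed_search_fields_for_vip_level := by
  intro vl _
  unfold Spec_allowed_search_fields_for_vip_level allowed_search_fields_for_vip_level
    allowed_search_fields_for_vip_level_alt
  by_cases h1 : vl = 1 ∨ vl = 11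
  · rcases h1 with h | h <;> subst h <;> decide
  by_cases h2 : vl = 2 ∨ vl = 12
  · rcases h2 with h | h <;> subst h <;> decide
  by_cases h13 : vl = 13
  · subst h13; decide
  by_cases h5 : vl = 5
  · subst h5; decide
  by_cases h22 : vl = 22
  · subst h22; decide
  -- remaining: the dict lookup misses
  rw [not_or] at h1 h2
  have hget : EXTRA_BY_LEVEL.get? vl = none := by
    have hmk : EXTRA_BY_LEVEL = PySem.Dict.mk
        [(1, LEVEL11_SEARCH_FIELDS),
         (11, LEVEL11_SEARCH_FIELDS),
         (2, LEVEL11_SEARCH_FIELDS ++ LEVEL12_SEARCH_FIELDS),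
         (12, LEVEL11_SEARCH_FIELDS ++ LEVEL12_SEARCH_FIELDS),
         (5, LEVEL11_SEARCH_FIELDS ++ LEVEL12_SEARCH_FIELDS ++ LEVEL13_SEARCH_FIELDS ++ LEVEL5_SEARCH_FIELDS),
         (22, [])] := by decide
    rw [hmk]
    simp [PySem.Dict.get?_mk_cons, beq_iff_eq]
    split_ifs <;> first | rfl | (exfalso; omega)
  by_cases hgt : vl > 13
  · have hge : vl ≥ 13 := by omega
    simp only [h1, h2, h13, h5, h22, hget, hgt, hge, if_false]
    decide
  · have hge : ¬ vl ≥ 13 := by omega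
    simp only [h1, h2, h13, h5, h22, hget, hgt, hge, if_false]
    decide
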